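-- pv_equiv track=rewrite | github.com/Pongchi/TIL | CodingTest/BAEKJOON/Fly me to the Alpha Centauri.py | min_teleport
-- ===== SOURCE A (Python) =====
-- def min_teleport(distance):
--     if distance <= 2:
--         return distance
--
--     result = 2
--     for i in range(result, distance+1):
--         if i  % 2 != 0:
--             result += 1
--
--     return result
-- ===== SOURCE B (Python) =====
-- def min_teleport(distance):
--     # Closed form: for distance > 2 the loop counts the odd integers in
--     # [3, distance], i.e. (distance - 1) // 2 of them, on top of the base 2.
--     if distance <= 2:
--         return distance
--     return 2 + (distance - 1) // 2
-- ===== Notes on version B (the rewrite author's own statement) =====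
-- stated objective: faster
-- what changed: Replaced the O(distance) loop counting odd integers in [2, distance] with the closed form 2 + (distance - 1) // 2.
import Mathlib
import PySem

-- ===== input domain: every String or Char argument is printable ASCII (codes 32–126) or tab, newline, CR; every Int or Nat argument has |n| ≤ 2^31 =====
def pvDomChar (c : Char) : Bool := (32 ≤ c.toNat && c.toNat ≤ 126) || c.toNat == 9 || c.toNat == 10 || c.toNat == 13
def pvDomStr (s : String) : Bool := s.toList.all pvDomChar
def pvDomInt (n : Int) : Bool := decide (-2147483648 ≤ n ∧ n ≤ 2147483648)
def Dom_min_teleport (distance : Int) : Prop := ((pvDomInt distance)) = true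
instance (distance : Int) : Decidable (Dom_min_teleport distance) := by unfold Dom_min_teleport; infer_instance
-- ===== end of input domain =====

-- B replaces A's O(distance) counting loop with the closed form 2 + (distance-1)//2 (faster).

-- ===== PORT A =====
def min_teleport (distance : Int) : Int :=
  if distance ≤ 2 then distance
  else
    (PySem.List.pyRange 2 (distance + 1) 1).foldl
      (fun result i => if PySem.Int.mod i 2 ≠ 0 then result + 1 else result) 2

-- ===== PORT B =====
def min_teleport_alt (distance : Int) : Int :=
  if distance ≤ 2 then distance
  else 2 + PySem.Int.floordiv (distance - 1) 2

-- ===== PRECONDITION & SPEC =====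
def Spec_min_teleport (distance : Int) (out : Int) : Prop := out = min_teleport_alt distance
instance (distance : Int) (out : Int) : Decidable (Spec_min_teleport distance out) := by unfold Spec_min_teleport; infer_instance

-- ===== CLAIM (what is proved, stated in full; the proofs are below) =====
def Claim_equal_min_teleport : Prop := ∀ (distance : Int), Dom_min_teleport distance → Spec_min_teleport distance (min_teleport distance)

-- ===== LEMMAS AND PROOFS =====

theorem min_teleport_loop (n : Nat) (acc : Int) :
    (PySem.List.pyRange 2 (2 + (n : Int)) 1).foldl
      (fun result i => if PySem.Int.mod i 2 ≠ 0 then result + 1 else result) acc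
      = acc + (n : Int) / 2 := by
  induction n generalizing acc with
  | zero => simp [PySem.List.pyRange_one_eq_nil]
  | succ k ih =>
    have h : (2 : Int) ≤ 2 + (k : Int) := by omega
    have hsplit : PySem.List.pyRange 2 (2 + ((k : Int) + 1)) 1
        = PySem.List.pyRange 2 (2 + (k : Int)) 1 ++ [2 + (k : Int)] := by
      have := PySem.List.pyRange_one_succ_right (a := 2) (b := 2 + (k : Int)) h
      rw [← this]; ring_nf
    push_cast
    rw [hsplit, List.foldl_append, ih]
    simp only [List.foldl_cons, List.foldl_nil]
    rw [PySem.Int.mod_eq_emod_of_pos (by omega : (0:Int) < 2)]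
    split_ifs with hodd <;> omega

-- ===== VERDICT (by name: the statement is the Claim_ definition above) =====
theorem min_teleport_spec : Claim_equal_min_teleport := by
  intro d _
  unfold Spec_min_teleport min_teleport min_teleport_alt
  split_ifs with h
  · rfl
  · have hn : ∃ n : Nat, d + 1 = 2 + (n : Int) := ⟨(d - 1).toNat, by omega⟩
    obtain ⟨n, hn⟩ := hn
    rw [hn, min_teleport_loop,
      PySem.Int.floordiv_eq_ediv_of_pos (by omega : (0:Int) < 2)]
    omega
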